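-- pv_equiv track=rewrite | github.com/hydropix/TranslateBookWithLLM | src/core/epub/placeholder_validator.py | get_missing_placeholders
-- ===== SOURCE A (Python) =====
-- from typing import Dict, Tuple, List
--
-- def get_missing_placeholders(
--     text: str,
--     expected_tag_map: Dict[str, str]
-- ) -> List[str]:
--     """Get list of missing placeholders.
--
--     Args:
--         text: Text to check
--         expected_tag_map: Expected placeholders
--
--     Returns:
--         List of missing placeholder IDs
--     """
--     missing = []
--     for placeholder in expected_tag_map:
--         if placeholder not in text:
--             missing.append(placeholder)
--     return missing
-- ===== SOURCE B (Python) =====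
-- def get_missing_placeholders(text, expected_tag_map):
--     # Build an index of all substrings of text for each needed pattern length,
--     # then answer each membership query by set lookup.
--     lengths = {len(p) for p in expected_tag_map}
--     present = set()
--     for L in lengths:
--         for i in range(len(text) - L + 1):
--             present.add(text[i:i + L])
--     return [p for p in expected_tag_map if p not in present]
-- ===== Notes on version B (the rewrite author's own statement) =====
-- stated objective: faster
-- what changed: Instead of running a separate substring search over the text for every placeholder, B builds once a hash-set index of all substrings of text at each distinct placeholder length and answers every placeholder by an O(1) average set lookup.
import Mathlib
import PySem

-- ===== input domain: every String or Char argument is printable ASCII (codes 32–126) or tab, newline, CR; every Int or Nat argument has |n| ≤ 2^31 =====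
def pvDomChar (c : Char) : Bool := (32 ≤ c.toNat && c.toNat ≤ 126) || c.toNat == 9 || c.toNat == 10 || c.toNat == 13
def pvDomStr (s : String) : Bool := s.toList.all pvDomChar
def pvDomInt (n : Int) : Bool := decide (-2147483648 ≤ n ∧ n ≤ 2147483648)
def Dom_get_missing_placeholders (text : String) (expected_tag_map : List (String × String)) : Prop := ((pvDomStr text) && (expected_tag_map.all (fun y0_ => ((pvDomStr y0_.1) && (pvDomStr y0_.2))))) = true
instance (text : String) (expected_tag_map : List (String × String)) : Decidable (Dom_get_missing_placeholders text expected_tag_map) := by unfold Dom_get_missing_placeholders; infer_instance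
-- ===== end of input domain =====

-- B replaces the per-placeholder substring scan of A by a substring index of the
-- text (all substrings at each distinct placeholder length, built once), queried
-- by set membership per placeholder.

-- ===== PORT A =====
-- 'for placeholder in expected_tag_map: if placeholder not in text: missing.append(placeholder)'
def get_missing_placeholders (text : String) (expected_tag_map : List (String × String)) : List String :=
  expected_tag_map.foldl
    (fun missing kv => if !PySem.Str.isIn kv.1 text then missing ++ [kv.1] else missing)
    []

-- ===== PORT B =====
-- str slices text[i:i+L] are taken on the character list: PySem.List.slice on text.toList (exact).
def get_missing_placeholders_alt (text : String) (expected_tag_map : List (String × String)) : List String :=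
  let cs := text.toList
  let lengths : PySem.Set Int :=
    PySem.Set.ofList (expected_tag_map.map (fun kv => PySem.Str.len kv.1))
  let present : PySem.Set (List Char) :=
    lengths.foldl
      (fun s L =>
        (PySem.List.pyRange 0 (PySem.Str.len text - L + 1)).foldl
          (fun s i => s.add (PySem.List.slice cs (some i) (some (i + L)))) s)
      PySem.Set.empty
  expected_tag_map.foldl
    (fun out kv => if !present.contains kv.1.toList then out ++ [kv.1] else out)
    []

-- ===== PRECONDITION & SPEC =====
def Spec_get_missing_placeholders (text : String) (expected_tag_map : List (String × String)) (out : List String) : Prop := out = get_missing_placeholders_alt text expected_tag_map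
instance (text : String) (expected_tag_map : List (String × String)) (out : List String) : Decidable (Spec_get_missing_placeholders text expected_tag_map out) := by unfold Spec_get_missing_placeholders; infer_instance

-- ===== CLAIM (what is proved, stated in full; the proofs are below) =====
def Claim_equal_get_missing_placeholders : Prop := ∀ (text : String) (expected_tag_map : List (String × String)), Dom_get_missing_placeholders text expected_tag_map → Spec_get_missing_placeholders text expected_tag_map (get_missing_placeholders text expected_tag_map)

-- ===== LEMMAS AND PROOFS =====

-- membership in a fold that only adds elements to a set
theorem pv_mem_foldl_add {β : Type} (l : List β) (f : β → List Char) (s : PySem.Set (List Char))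
    (y : List Char) :
    (y ∈ l.foldl (fun s i => PySem.Set.add s (f i)) s) ↔ y ∈ s ∨ ∃ i ∈ l, f i = y := by
  induction l generalizing s with
  | nil => simp
  | cons a t ih =>
    simp only [List.foldl_cons, ih, PySem.Set.mem_add, List.mem_cons]
    constructor
    · rintro (⟨h | h⟩ | ⟨i, hi, h⟩)
      · exact Or.inl h
      · exact Or.inr ⟨a, Or.inl rfl, h.symm⟩
      · exact Or.inr ⟨i, Or.inr hi, h⟩
    · rintro (h | ⟨i, (rfl | hi), h⟩)
      · exact Or.inl (Or.inl h)
      · exact Or.inl (Or.inr h.symm)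
      · exact Or.inr ⟨i, hi, h⟩

-- membership in the nested index-building fold of B
theorem pv_mem_present (Ls : List Int) (r : Int → List Int) (f : Int → Int → List Char)
    (s : PySem.Set (List Char)) (y : List Char) :
    (y ∈ Ls.foldl (fun s L => (r L).foldl (fun s i => PySem.Set.add s (f L i)) s) s) ↔
      y ∈ s ∨ ∃ L ∈ Ls, ∃ i ∈ r L, f L i = y := by
  induction Ls generalizing s with
  | nil => simp
  | cons a t ih =>
    simp only [List.foldl_cons, ih, pv_mem_foldl_add, List.mem_cons]
    constructor
    · rintro (⟨h | ⟨i, hi, h⟩⟩ | ⟨L, hL, hrest⟩)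
      · exact Or.inl h
      · exact Or.inr ⟨a, Or.inl rfl, i, hi, h⟩
      · exact Or.inr ⟨L, Or.inr hL, hrest⟩
    · rintro (h | ⟨L, (rfl | hL), hrest⟩)
      · exact Or.inl (Or.inl h)
      · exact Or.inl (Or.inr hrest)
      · exact Or.inr ⟨L, hL, hrest⟩

-- the index contains p.toList iff p occurs as a substring of text, for p a key of the map
theorem pv_present_iff (text : String) (m : List (String × String)) (p : String)
    (hp : (PySem.Str.len p) ∈ m.map (fun kv => PySem.Str.len kv.1)) :
    (p.toList ∈
      (PySem.Set.ofList (m.map (fun kv => PySem.Str.len kv.1))).foldl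
        (fun s L =>
          (PySem.List.pyRange 0 (PySem.Str.len text - L + 1)).foldl
            (fun s i => PySem.Set.add s (PySem.List.slice text.toList (some i) (some (i + L)))) s)
        PySem.Set.empty) ↔ p.toList <:+: text.toList := by
  rw [pv_mem_present _ _ (fun L i => PySem.List.slice text.toList (some i) (some (i + L)))]
  constructor
  · rintro (h | ⟨L, hL, i, hi, h⟩)
    · simp [PySem.Set.empty] at h
    · obtain ⟨h0, _⟩ := PySem.List.mem_pyRange_one.1 hi
      -- L is the length of some key, hence 0 ≤ L
      have hLpos : 0 ≤ L := by
        obtain ⟨kv, _, rfl⟩ := List.mem_map.1 ((PySem.Set.mem_ofList _ _).1 hL)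
        rw [PySem.Str.len_eq]; positivity
      have hiL : i = ((i.toNat : Nat) : Int) := by omega
      have hsum : i + L = (((i.toNat + L.toNat : Nat)) : Int) := by omega
      rw [hsum, hiL, PySem.List.slice_natCast] at h
      simp only [Int.toNat_natCast] at h
      have htn : i.toNat + L.toNat - i.toNat = L.toNat := by omega
      rw [htn] at h
      rw [← h]
      exact (List.take_prefix _ _).isInfix.trans (List.drop_suffix _ _).isInfix
  · intro h
    obtain ⟨sl, tl, hcat⟩ := h
    have hcat' : text.toList = sl ++ p.toList ++ tl := by simp [← hcat]
    refine Or.inr ⟨PySem.Str.len p, (PySem.Set.mem_ofList _ _).2 hp, (sl.length : Int), ?_, ?_⟩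
    · rw [PySem.List.mem_pyRange_one]
      constructor
      · positivity
      · rw [PySem.Str.len_eq, PySem.Str.len_eq, hcat']
        simp; omega
    · rw [PySem.Str.len_eq]
      have : (sl.length : Int) + (p.toList.length : Int) = ((sl.length + p.toList.length : Nat) : Int) := by push_cast; ring
      rw [this, PySem.List.slice_natCast, hcat']
      have h1 : sl.length + p.toList.length - sl.length = p.toList.length := by omega
      rw [h1]
      rw [List.append_assoc, List.drop_left]
      exact List.take_left

-- proof-side name for B's substring index (used only in the proofs below)
def pvPresent (text : String) (m : List (String × String)) : PySem.Set (List Char) :=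
  (PySem.Set.ofList (m.map (fun kv => PySem.Str.len kv.1))).foldl
    (fun s L =>
      (PySem.List.pyRange 0 (PySem.Str.len text - L + 1)).foldl
        (fun s i => s.add (PySem.List.slice text.toList (some i) (some (i + L)))) s)
    PySem.Set.empty

-- ===== VERDICT (by name: the statement is the Claim_ definition above) =====
theorem get_missing_placeholders_spec : Claim_equal_get_missing_placeholders := by
  intro text m _
  unfold Spec_get_missing_placeholders get_missing_placeholders get_missing_placeholders_alt
  apply Eq.symm
  show List.foldl (fun out kv => if (!PySem.Set.contains (pvPresent text m) kv.1.toList) = true then out ++ [kv.1] else out) [] m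
     = List.foldl (fun missing kv => if (!PySem.Str.isIn kv.1 text) = true then missing ++ [kv.1] else missing) [] m
  refine PySem.List.foldl_congr_mem' _ _ _ _ ?_
  intro kv hkv acc
  have hp : PySem.Str.len kv.1 ∈ m.map (fun kv => PySem.Str.len kv.1) :=
    List.mem_map.2 ⟨kv, hkv, rfl⟩
  have hiff := pv_present_iff text m kv.1 hp
  have hcontains : PySem.Set.contains (pvPresent text m) kv.1.toList = PySem.Str.isIn kv.1 text := by
    rcases Bool.eq_false_or_eq_true (PySem.Str.isIn kv.1 text) with h | h
    · rw [h]
      exact (PySem.Set.contains_iff _ _).2 (hiff.2 ((PySem.Str.isIn_iff_infix _ _).1 h))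
    · rw [h]
      cases hval : PySem.Set.contains (pvPresent text m) kv.1.toList with
      | false => rfl
      | true =>
        have hmem := (PySem.Set.contains_iff _ _).1 hval
        have hinf := hiff.1 hmem
        rw [← PySem.Str.isIn_iff_infix] at hinf
        exact absurd (h.symm.trans hinf) (by decide)
  rw [hcontains]
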